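-- pv_equiv track=rewrite | github.com/DhananjayAshok/SMT-Trained-BNNs | tests/CNF_tests.py | complete_assignments
-- ===== SOURCE A (Python) =====
-- def complete_assignments(assignment):
--     if None not in assignment:
--         return [assignment]
--     else:
--         none_ind = assignment.index(None)
--         b1 = assignment.copy()
--         b2 = assignment.copy()
--         b1[none_ind] = True
--         b2[none_ind] = False
--         return complete_assignments(b1) + complete_assignments(b2)
-- ===== SOURCE B (Python) =====
-- def complete_assignments(assignment):
--     if not assignment:
--         return [[]]
--     head, rest = assignment[0], assignment[1:]
--     tails = complete_assignments(rest)
--     if head is None: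
--         return [[True] + t for t in tails] + [[False] + t for t in tails]
--     return [[head] + t for t in tails]
-- ===== Notes on version B (the rewrite author's own statement) =====
-- stated objective: simpler
-- what changed: Replaced A's find-first-None + two full copies + binary recursion on the modified list by a single structural recursion on the list head that builds completions by prepending, removing the index search and copying.
import Mathlib
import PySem

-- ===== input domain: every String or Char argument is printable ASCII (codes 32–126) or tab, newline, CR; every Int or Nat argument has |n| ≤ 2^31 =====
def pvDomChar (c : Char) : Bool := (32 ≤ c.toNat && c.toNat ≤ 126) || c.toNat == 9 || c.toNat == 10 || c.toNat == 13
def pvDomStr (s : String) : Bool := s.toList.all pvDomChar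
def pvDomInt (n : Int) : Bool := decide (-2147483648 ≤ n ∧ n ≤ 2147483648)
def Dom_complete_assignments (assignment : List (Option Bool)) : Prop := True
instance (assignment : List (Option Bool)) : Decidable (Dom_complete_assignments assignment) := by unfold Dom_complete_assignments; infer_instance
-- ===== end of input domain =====

-- B replaces A's find-first-None / copy-twice / two-way recursion by a single structural
-- recursion on the head of the list (objective: simpler; no copies, no index search).

-- termination lemma for port A (cited by name in its decreasing_by)
theorem pvCountSetLt (l : List (Option Bool)) (h : (none : Option Bool) ∈ l) (b : Bool) :
    ((l.set ((PySem.List.index? l (none : Option Bool)).getD 0) (some b)).count none)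
      < l.count none := by
  obtain ⟨i, hi⟩ := Option.isSome_iff_exists.mp ((PySem.List.index?_isSome_iff l none).mpr h)
  obtain ⟨pre, suf, rfl, hlen, hnp⟩ := (PySem.List.index?_eq_some_iff _ _ _).mp hi
  have hset : (pre ++ (none : Option Bool) :: suf).set pre.length (some b)
      = pre ++ some b :: suf := by
    induction pre with
    | nil => rfl
    | cons x xs _ => simp
  subst hlen
  rw [hi]
  simp [hset, List.count_append]

-- ===== PORT A =====
def complete_assignments (assignment : List (Option Bool)) : List (List Bool) :=
  if h : (none : Option Bool) ∈ assignment then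
    -- none_ind = assignment.index(None): index? is some here since None is present
    let none_ind := (PySem.List.index? assignment (none : Option Bool)).getD 0
    let b1 := assignment.set none_ind (some true)
    let b2 := assignment.set none_ind (some false)
    complete_assignments b1 ++ complete_assignments b2
  else
    -- no None present: every element is `some b`, so this is assignment itself
    [assignment.map (fun o => o.getD true)]
termination_by assignment.count none
decreasing_by
  · exact pvCountSetLt assignment h true
  · exact pvCountSetLt assignment h false

-- ===== PORT B =====
def complete_assignments_alt : List (Option Bool) → List (List Bool)
  | [] => [[]]
  | head :: rest =>
    let tails := complete_assignments_alt rest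
    match head with
    | none => tails.map (fun t => true :: t) ++ tails.map (fun t => false :: t)
    | some b => tails.map (fun t => b :: t)

-- ===== PRECONDITION & SPEC =====
def Spec_complete_assignments (assignment : List (Option Bool)) (out : List (List Bool)) : Prop := out = complete_assignments_alt assignment
instance (assignment : List (Option Bool)) (out : List (List Bool)) : Decidable (Spec_complete_assignments assignment out) := by unfold Spec_complete_assignments; infer_instance

-- ===== CLAIM (what is proved, stated in full; the proofs are below) =====
def Claim_equal_complete_assignments : Prop := ∀ (assignment : List (Option Bool)), Dom_complete_assignments assignment → Spec_complete_assignments assignment (complete_assignments assignment)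

-- ===== LEMMAS AND PROOFS =====

theorem alt_of_not_mem (l : List (Option Bool)) (h : (none : Option Bool) ∉ l) :
    complete_assignments_alt l = [l.map (fun o => o.getD true)] := by
  induction l with
  | nil => rfl
  | cons x xs ih =>
    match x with
    | none => exact absurd (List.mem_cons_self) h
    | some b =>
      simp [complete_assignments_alt, ih (fun hx => h (List.mem_cons_of_mem _ hx))]

theorem alt_append (p r : List (Option Bool)) (h : (none : Option Bool) ∉ p) :
    complete_assignments_alt (p ++ r)
      = (complete_assignments_alt r).map (fun t => p.map (fun o => o.getD true) ++ t) := by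
  induction p with
  | nil => simp
  | cons x xs ih =>
    match x with
    | none => exact absurd (List.mem_cons_self) h
    | some b =>
      simp [complete_assignments_alt, ih (fun hx => h (List.mem_cons_of_mem _ hx)),
        List.map_map, Function.comp_def]

theorem eq_of_count (n : Nat) :
    ∀ l : List (Option Bool), l.count none = n →
      complete_assignments l = complete_assignments_alt l := by
  induction n using Nat.strong_induction_on with
  | _ n ih =>
    intro l hl
    rw [complete_assignments]
    by_cases h : (none : Option Bool) ∈ l
    · rw [dif_pos h]
      obtain ⟨i, hi⟩ := Option.isSome_iff_exists.mp ((PySem.List.index?_isSome_iff l none).mpr h)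
      obtain ⟨pre, suf, rfl, hlen, hnp⟩ := (PySem.List.index?_eq_some_iff _ _ _).mp hi
      subst hlen
      have hset : ∀ b : Bool, (pre ++ (none : Option Bool) :: suf).set pre.length (some b)
          = pre ++ some b :: suf := by
        intro b
        induction pre with
        | nil => rfl
        | cons x xs _ => simp
      have hlt : ∀ b : Bool,
          ((pre ++ (none : Option Bool) :: suf).set
            ((PySem.List.index? (pre ++ (none : Option Bool) :: suf) none).getD 0)
            (some b)).count none < n :=
        fun b => hl ▸ pvCountSetLt _ h b
      change complete_assignments _ ++ complete_assignments _ = _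
      rw [ih _ (hlt true) _ rfl, ih _ (hlt false) _ rfl]
      rw [hi]
      simp only [Option.getD_some, hset]
      rw [alt_append _ _ hnp, alt_append _ _ hnp, alt_append _ _ hnp]
      simp [complete_assignments_alt, List.map_map, Function.comp_def]
    · rw [dif_neg h, alt_of_not_mem l h]

-- ===== VERDICT (by name: the statement is the Claim_ definition above) =====
theorem complete_assignments_spec : Claim_equal_complete_assignments := by
  intro l _
  unfold Spec_complete_assignments
  exact eq_of_count (l.count none) l rfl
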